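-- pv_equiv track=rewrite | github.com/goldenstein64/DailyInterviewPro | solutions/_2025/_09_september/_14_list_word_ring.py | chained_words
-- ===== SOURCE A (Python) =====
-- from collections import defaultdict, Counter
--
-- def chained_words(words: list[str]) -> bool:
--     """
--     Determine whether every word in `words` can be chained into one cycle. This
--     uses a brute-force algorithm that checks whether all words would be seen
--     when iterating through `words` once.
--
--     This has around O(n^2) time complexity and O(n) space.
--     """
--     sorted_words = sorted(words)
--     reverse_map2: defaultdict[str, set[int]] = defaultdict(set)
--     for i, v in enumerate(sorted_words):
--         reverse_map2[v[0]].add(i)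
--
--     indexes: set[int] = reverse_map2[sorted_words[0][-1]]
--     seen: set[int] = indexes
--     for _ in range(len(reverse_map2)):
--         new_indexes: set[int] = set()
--         for i in indexes:
--             new_indexes |= reverse_map2[sorted_words[i][-1]]
--         indexes = new_indexes
--         seen |= indexes
--
--     return len(seen) == len(words)
-- ===== SOURCE B (Python) =====
-- def chained_words(words: list[str]) -> bool:
--     """
--     Reachability over the letter graph: a word is "seen" iff its first letter
--     is reachable (via first-letter -> last-letter edges) from the last letter
--     of the smallest word.  O(n + k^2) for k distinct letters instead of
--     A's O(n^2) index-set iteration.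
--     """
--     firsts = {w[0] for w in words}
--     succ = {}
--     for w in words:
--         succ[w[0]] = succ.get(w[0], set()) | {w[-1]}
--     reach = set()
--     pending = [min(words)[-1]]
--     while pending:
--         c = pending.pop(0)
--         if c in firsts and c not in reach:
--             reach.add(c)
--             pending.extend(succ[c])
--     return all(w[0] in reach for w in words)
-- ===== Notes on version B (the rewrite author's own statement) =====
-- stated objective: faster
-- what changed: B replaces A's sort plus repeated unions of index sets (frontier of word indices, iterated len(dict) times) by a single-pass letter graph (first letter -> last letters) and a worklist reachability over at most the distinct first letters, then one membership test per word.
import Mathlib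
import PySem

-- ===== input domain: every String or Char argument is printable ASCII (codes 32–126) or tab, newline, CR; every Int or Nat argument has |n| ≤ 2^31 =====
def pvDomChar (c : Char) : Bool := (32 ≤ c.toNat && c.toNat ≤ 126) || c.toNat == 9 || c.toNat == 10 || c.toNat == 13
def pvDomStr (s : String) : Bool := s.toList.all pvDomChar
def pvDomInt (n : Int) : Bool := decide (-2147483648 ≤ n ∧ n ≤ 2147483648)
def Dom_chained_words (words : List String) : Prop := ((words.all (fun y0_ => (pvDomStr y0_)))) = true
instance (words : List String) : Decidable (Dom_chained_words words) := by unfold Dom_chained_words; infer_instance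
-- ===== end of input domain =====

-- B replaces A's sort + iterated unions of word-index sets by reachability on the
-- first-letter -> last-letter graph followed by one membership test per word (faster).

-- w[0] and w[-1] (Python raises on "", which Pre_ excludes; the .getD default is never read there)
def pvFirst (w : String) : Char := (PySem.Str.pyGet? w 0).getD ' '
def pvLast (w : String) : Char := (PySem.Str.pyGet? w (-1)).getD ' '

-- ===== PORT A =====
def chained_words (words : List String) : Bool :=
  let sorted_words := PySem.List.sorted words (fun w => w) false
  let reverse_map2 : PySem.Dict Char (PySem.Set Int) :=
    (PySem.List.enumerate sorted_words 0).foldl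
      (fun d iv => d.modify (pvFirst iv.2) PySem.Set.empty (fun s => PySem.Set.add s iv.1))
      PySem.Dict.empty
  let start := pvLast ((PySem.List.pyGet? sorted_words 0).getD "")
  -- defaultdict access: reading reverse_map2[start] inserts an empty bucket if absent
  let reverse_map2 := if reverse_map2.contains start then reverse_map2
                      else reverse_map2.insert start PySem.Set.empty
  let indexes := reverse_map2.getD start PySem.Set.empty
  let state := (PySem.List.pyRange 0 (reverse_map2.size) 1).foldl
    (fun (st : PySem.Set Int × PySem.Set Int) _ =>
      let new_indexes := st.1.foldl
        (fun acc i => PySem.Set.union acc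
          (reverse_map2.getD (pvLast ((PySem.List.pyGet? sorted_words i).getD "")) PySem.Set.empty))
        PySem.Set.empty
      (new_indexes, PySem.Set.union st.2 new_indexes))
    (indexes, indexes)
  PySem.Set.len state.2 == (words.length : Int)

-- ===== PORT B =====
-- termination helper for the worklist loop: marking a fresh first letter shrinks the unvisited part
theorem pvUnvisitedLt (l : List Char) (r : PySem.Set Char) (c : Char)
    (hc : c ∈ l) (hcr : c ∉ r) :
    (l.filter (fun x => !(PySem.Set.contains (PySem.Set.add r c) x))).length
      < (l.filter (fun x => !(PySem.Set.contains r x))).length := by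
  have hqp : ∀ x : Char, (!(PySem.Set.contains (PySem.Set.add r c) x)) = true →
      (!(PySem.Set.contains r x)) = true := by
    intro x hx
    rw [Bool.not_eq_true'] at hx ⊢
    rw [Bool.eq_false_iff] at hx ⊢
    intro h
    exact hx ((PySem.Set.contains_iff _ x).mpr
      ((PySem.Set.mem_add r c x).mpr (Or.inl ((PySem.Set.contains_iff r x).mp h))))
  have hqc : (!(PySem.Set.contains (PySem.Set.add r c) c)) = false := by
    have hmem : c ∈ PySem.Set.add r c := (PySem.Set.mem_add r c c).mpr (Or.inr rfl)
    rw [(PySem.Set.contains_iff _ c).mpr hmem]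
    rfl
  have hpc : (!(PySem.Set.contains r c)) = true := by
    rw [Bool.not_eq_true', Bool.eq_false_iff]
    intro h
    exact hcr ((PySem.Set.contains_iff r c).mp h)
  induction l with
  | nil => cases hc
  | cons a t ih =>
    cases hb1 : (!(PySem.Set.contains (PySem.Set.add r c) a)) with
    | true =>
      have hb2 := hqp a hb1
      have e1 : (List.filter (fun x => !(PySem.Set.contains (PySem.Set.add r c) x)) (a :: t)).length
          = (List.filter (fun x => !(PySem.Set.contains (PySem.Set.add r c) x)) t).length + 1 := by
        rw [List.filter_cons, if_pos hb1, List.length_cons]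
      have e2 : (List.filter (fun x => !(PySem.Set.contains r x)) (a :: t)).length
          = (List.filter (fun x => !(PySem.Set.contains r x)) t).length + 1 := by
        rw [List.filter_cons, if_pos hb2, List.length_cons]
      rcases List.mem_cons.mp hc with heq | hat
      · exfalso
        rw [← heq, hqc] at hb1
        exact Bool.noConfusion hb1
      · have := ih hat
        omega
    | false =>
      have e1 : (List.filter (fun x => !(PySem.Set.contains (PySem.Set.add r c) x)) (a :: t)).length
          = (List.filter (fun x => !(PySem.Set.contains (PySem.Set.add r c) x)) t).length := by
        rw [List.filter_cons, if_neg (by rw [hb1]; exact fun h => Bool.noConfusion h)]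
      cases hb2 : (!(PySem.Set.contains r a)) with
      | true =>
        have e2 : (List.filter (fun x => !(PySem.Set.contains r x)) (a :: t)).length
            = (List.filter (fun x => !(PySem.Set.contains r x)) t).length + 1 := by
          rw [List.filter_cons, if_pos hb2, List.length_cons]
        rcases List.mem_cons.mp hc with heq | hat
        · have hle := (List.monotone_filter_right t hqp).length_le
          omega
        · have := ih hat
          omega
      | false =>
        have e2 : (List.filter (fun x => !(PySem.Set.contains r x)) (a :: t)).length
            = (List.filter (fun x => !(PySem.Set.contains r x)) t).length := by
          rw [List.filter_cons, if_neg (by rw [hb2]; exact fun h => Bool.noConfusion h)]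
        rcases List.mem_cons.mp hc with heq | hat
        · exfalso
          rw [← heq, hpc] at hb2
          exact Bool.noConfusion hb2
        · have := ih hat
          omega

def bfsLetters (firsts : PySem.Set Char) (succ : PySem.Dict Char (PySem.Set Char)) :
    List Char → PySem.Set Char → PySem.Set Char
  | [], reach => reach
  | c :: pending, reach =>
    if PySem.Set.contains firsts c && !(PySem.Set.contains reach c) then
      bfsLetters firsts succ (pending ++ succ.getD c PySem.Set.empty) (PySem.Set.add reach c)
    else
      bfsLetters firsts succ pending reach
termination_by pending reach =>
  ((firsts.filter (fun x => !(PySem.Set.contains reach x))).length, pending.length)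
decreasing_by
  · apply Prod.Lex.left
    rename_i h
    simp only [Bool.and_eq_true, Bool.not_eq_true'] at h
    refine pvUnvisitedLt firsts reach c ?_ ?_
    · exact (PySem.Set.contains_iff firsts c).mp h.1
    · intro hm
      rw [(PySem.Set.contains_iff reach c).mpr hm] at h
      exact Bool.noConfusion h.2
  · apply Prod.Lex.right
    simp

def chained_words_alt (words : List String) : Bool :=
  let firsts : PySem.Set Char := PySem.Set.ofList (words.map (fun w => pvFirst w))
  let succ : PySem.Dict Char (PySem.Set Char) := words.foldl
    (fun d w => d.insert (pvFirst w)
      (PySem.Set.union (d.getD (pvFirst w) PySem.Set.empty) (PySem.Set.ofList [pvLast w])))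
    PySem.Dict.empty
  let reach := bfsLetters firsts succ
    [pvLast ((PySem.List.min? words (fun w => w)).getD "")] PySem.Set.empty
  words.all (fun w => PySem.Set.contains reach (pvFirst w))

-- ===== PRECONDITION & SPEC =====
-- Pre_ excludes exactly the inputs where Python A raises IndexError: the empty list and lists containing an empty word.
def Pre_chained_words (words : List String) : Prop := words ≠ [] ∧ ∀ w ∈ words, w ≠ ""
instance (words : List String) : Decidable (Pre_chained_words words) := by
  unfold Pre_chained_words; infer_instance

def pvWitness_chained_words : List String := (["ab", "ba"])

def Spec_chained_words (words : List String) (out : Bool) : Prop := out = chained_words_alt words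
instance (words : List String) (out : Bool) : Decidable (Spec_chained_words words out) := by
  unfold Spec_chained_words; infer_instance

-- ===== CLAIM (what is proved, stated in full; the proofs are below) =====
def Claim_equal_chained_words : Prop := ∀ (words : List String), Dom_chained_words words → Pre_chained_words words → Spec_chained_words words (chained_words words)

-- ===== LEMMAS AND PROOFS =====

-- (first, last) letter pairs of a word list, the set of first letters, and the
-- cumulative (pvP) / frontier (pvQ) letter-reachability sets from a start letter
def pvPairs (ws : List String) : List (Char × Char) := ws.map (fun w => (pvFirst w, pvLast w))

def pvFirstsF (ps : List (Char × Char)) : Finset Char := (ps.map Prod.fst).toFinset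

def pvQ (ps : List (Char × Char)) (st : Char) : Nat → Finset Char
  | 0 => (pvFirstsF ps).filter (fun c => c = st)
  | t + 1 => (pvFirstsF ps).filter (fun c => ∃ p ∈ ps, p.1 ∈ pvQ ps st t ∧ p.2 = c)

def pvP (ps : List (Char × Char)) (st : Char) : Nat → Finset Char
  | 0 => (pvFirstsF ps).filter (fun c => c = st)
  | t + 1 => pvP ps st t ∪ (pvFirstsF ps).filter (fun c => ∃ p ∈ ps, p.1 ∈ pvP ps st t ∧ p.2 = c)

theorem pvPairs_fst (ws : List String) : (pvPairs ws).map Prod.fst = ws.map pvFirst := by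
  simp [pvPairs, List.map_map, Function.comp_def]

theorem pvStep_mono (ps : List (Char × Char)) {X Y : Finset Char} (h : X ⊆ Y) :
    (pvFirstsF ps).filter (fun c => ∃ p ∈ ps, p.1 ∈ X ∧ p.2 = c)
      ⊆ (pvFirstsF ps).filter (fun c => ∃ p ∈ ps, p.1 ∈ Y ∧ p.2 = c) := by
  intro c hcmem
  simp only [Finset.mem_filter] at *
  obtain ⟨hf, p, hp, h1, h2⟩ := hcmem
  exact ⟨hf, p, hp, h h1, h2⟩

theorem pvP_subset_firsts (ps : List (Char × Char)) (st : Char) (t : Nat) :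
    pvP ps st t ⊆ pvFirstsF ps := by
  induction t with
  | zero => exact Finset.filter_subset _ _
  | succ t ih =>
    simp only [pvP]
    exact Finset.union_subset ih (Finset.filter_subset _ _)

theorem pvP_mono (ps : List (Char × Char)) (st : Char) {a b : Nat} (h : a ≤ b) :
    pvP ps st a ⊆ pvP ps st b := by
  induction b, h using Nat.le_induction with
  | base => exact Finset.Subset.refl _
  | succ b hb ih =>
    refine ih.trans ?_
    simp only [pvP]
    exact Finset.subset_union_left

theorem pvQ_subset_pvP (ps : List (Char × Char)) (st : Char) (t : Nat) :
    pvQ ps st t ⊆ pvP ps st t := by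
  induction t with
  | zero => exact Finset.Subset.refl _
  | succ t ih =>
    simp only [pvQ, pvP]
    exact (pvStep_mono ps ih).trans Finset.subset_union_right

theorem pvP_eq_biUnion (ps : List (Char × Char)) (st : Char) (t : Nat) :
    pvP ps st t = (Finset.range (t + 1)).biUnion (pvQ ps st) := by
  induction t with
  | zero => simp [Finset.range_one, pvP, pvQ]
  | succ t ih =>
    apply Finset.Subset.antisymm
    · intro c hc
      simp only [pvP, Finset.mem_union] at hc
      rcases hc with hc | hc
      · rw [ih] at hc
        simp only [Finset.mem_biUnion, Finset.mem_range] at hc ⊢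
        obtain ⟨i, hi, hci⟩ := hc
        exact ⟨i, by omega, hci⟩
      · simp only [Finset.mem_filter] at hc
        obtain ⟨hcf, p, hp, h1, h2⟩ := hc
        rw [ih] at h1
        simp only [Finset.mem_biUnion, Finset.mem_range] at h1 ⊢
        obtain ⟨i, hi, hpi⟩ := h1
        refine ⟨i + 1, by omega, ?_⟩
        simp only [pvQ, Finset.mem_filter]
        exact ⟨hcf, p, hp, hpi, h2⟩
    · intro c hc
      simp only [Finset.mem_biUnion, Finset.mem_range] at hc
      obtain ⟨i, hi, hci⟩ := hc
      rcases Nat.lt_or_ge i (t + 1) with hit | hit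
      · have : c ∈ pvP ps st t := by
          rw [ih]
          simp only [Finset.mem_biUnion, Finset.mem_range]
          exact ⟨i, hit, hci⟩
        exact pvP_mono ps st (Nat.le_succ t) this
      · have hieq : i = t + 1 := by omega
        subst hieq
        simp only [pvQ, Finset.mem_filter] at hci
        obtain ⟨hcf, p, hp, h1, h2⟩ := hci
        simp only [pvP, Finset.mem_union]
        right
        simp only [Finset.mem_filter]
        exact ⟨hcf, p, hp, pvQ_subset_pvP ps st t h1, h2⟩

theorem pvP_succ_eq (ps : List (Char × Char)) (st : Char) (t : Nat) :
    pvP ps st (t + 1) = pvP ps st t ∪ pvQ ps st (t + 1) := by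
  rw [pvP_eq_biUnion ps st (t + 1), pvP_eq_biUnion ps st t]
  rw [Finset.range_add_one, Finset.biUnion_insert, Finset.union_comm]

theorem pvP_fix (ps : List (Char × Char)) (st : Char) (t : Nat)
    (h : pvP ps st (t + 1) = pvP ps st t) : ∀ s, pvP ps st (t + s) = pvP ps st t := by
  intro s
  induction s with
  | zero => rfl
  | succ s ih =>
    have h2 : pvP ps st (t + s + 1)
        = pvP ps st (t + s) ∪ (pvFirstsF ps).filter
            (fun c => ∃ p ∈ ps, p.1 ∈ pvP ps st (t + s) ∧ p.2 = c) := rfl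
    have h3 : pvP ps st (t + 1)
        = pvP ps st t ∪ (pvFirstsF ps).filter
            (fun c => ∃ p ∈ ps, p.1 ∈ pvP ps st t ∧ p.2 = c) := rfl
    rw [show t + (s + 1) = t + s + 1 by omega, h2, ih, ← h3, h]

theorem pvP_stable (ps : List (Char × Char)) (st : Char) {a b : Nat}
    (ha : (pvFirstsF ps).card ≤ a) (hb : (pvFirstsF ps).card ≤ b) :
    pvP ps st a = pvP ps st b := by
  have hfix : ∃ t ≤ (pvFirstsF ps).card, pvP ps st (t + 1) = pvP ps st t := by
    by_contra hcon
    push_neg at hcon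
    have grow : ∀ t, t ≤ (pvFirstsF ps).card + 1 → t ≤ (pvP ps st t).card := by
      intro t
      induction t with
      | zero => intro _; exact Nat.zero_le _
      | succ t ih =>
        intro ht
        have hne : pvP ps st (t + 1) ≠ pvP ps st t := hcon t (by omega)
        have hss : pvP ps st t ⊂ pvP ps st (t + 1) :=
          Finset.ssubset_iff_subset_ne.mpr ⟨pvP_mono ps st (Nat.le_succ t), fun e => hne e.symm⟩
        have h1 := Finset.card_lt_card hss
        have h2 := ih (by omega)
        omega
    have h2 := grow ((pvFirstsF ps).card + 1) le_rfl
    have h3 := Finset.card_le_card (pvP_subset_firsts ps st ((pvFirstsF ps).card + 1))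
    omega
  obtain ⟨t, htm, hfx⟩ := hfix
  have hall : ∀ x, (pvFirstsF ps).card ≤ x → pvP ps st x = pvP ps st t := by
    intro x hx
    have := pvP_fix ps st t hfx (x - t)
    rw [show t + (x - t) = x by omega] at this
    exact this
  rw [hall a ha, hall b hb]

theorem pvP_congr (ps ps' : List (Char × Char)) (st : Char) (h : ps.Perm ps') (t : Nat) :
    pvP ps st t = pvP ps' st t := by
  have hf : pvFirstsF ps = pvFirstsF ps' := by
    unfold pvFirstsF
    apply Finset.ext
    intro c
    simp only [List.mem_toFinset]
    exact (h.map Prod.fst).mem_iff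
  induction t with
  | zero => simp only [pvP, hf]
  | succ t ih =>
    simp only [pvP, ih, hf]
    congr 1
    apply Finset.filter_congr
    intro c _
    constructor
    · rintro ⟨p, hp, h1, h2⟩
      exact ⟨p, h.mem_iff.mp hp, h1, h2⟩
    · rintro ⟨p, hp, h1, h2⟩
      exact ⟨p, h.mem_iff.mpr hp, h1, h2⟩

-- minimality: pvP is contained in any closed set seeded with st
theorem pvP_subset_closed (ps : List (Char × Char)) (st : Char) (R : List Char)
    (hseed : st ∈ ps.map Prod.fst → st ∈ R)
    (hclosed : ∀ p ∈ ps, p.1 ∈ R → p.2 ∈ ps.map Prod.fst → p.2 ∈ R) :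
    ∀ t, ∀ c ∈ pvP ps st t, c ∈ R := by
  intro t
  induction t with
  | zero =>
    intro c hc
    simp only [pvP, Finset.mem_filter, pvFirstsF, List.mem_toFinset] at hc
    obtain ⟨hcf, rfl⟩ := hc
    exact hseed hcf
  | succ t ih =>
    intro c hc
    simp only [pvP, Finset.mem_union, Finset.mem_filter, pvFirstsF, List.mem_toFinset] at hc
    rcases hc with hc | ⟨hcf, p, hp, h1, h2⟩
    · exact ih c hc
    · subst h2
      exact hclosed p hp (ih _ h1) hcf

-- the characterization both ports are reduced to
def pvGoal (words : List String) (st : Char) : Prop :=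
  ∀ w ∈ words, pvFirst w ∈ pvP (pvPairs words) st words.length

-- generic helpers ----------------------------------------------------------

theorem pvBoolEq {a b : Bool} (h : a = true ↔ b = true) : a = b := by
  cases a <;> cases b <;> simp_all

theorem pvFoldlConst {α β : Type} (f : β → β) (l : List α) (b : β) :
    l.foldl (fun s _ => f s) b = f^[l.length] b := by
  induction l generalizing b with
  | nil => rfl
  | cons a t ih =>
    rw [List.foldl_cons, ih, List.length_cons, Function.iterate_succ_apply]

theorem pvUnionFold_mem {α : Type} [BEq α] [LawfulBEq α] (L : List Int)
    (g : Int → PySem.Set α) (acc : PySem.Set α) (x : α) :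
    x ∈ L.foldl (fun acc i => PySem.Set.union acc (g i)) acc ↔ x ∈ acc ∨ ∃ i ∈ L, x ∈ g i := by
  induction L generalizing acc with
  | nil => simp
  | cons a t ih =>
    rw [List.foldl_cons, ih, PySem.Set.mem_union]
    constructor
    · rintro ((h | h) | ⟨i, hi, hgi⟩)
      · exact Or.inl h
      · exact Or.inr ⟨a, List.mem_cons_self, h⟩
      · exact Or.inr ⟨i, List.mem_cons_of_mem _ hi, hgi⟩
    · rintro (h | ⟨i, hi, hgi⟩)
      · exact Or.inl (Or.inl h)
      · rcases List.mem_cons.mp hi with rfl | hi'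
        · exact Or.inl (Or.inr hgi)
        · exact Or.inr ⟨i, hi', hgi⟩

theorem pvUnionFold_nodup {α : Type} [BEq α] [LawfulBEq α] (L : List Int)
    (g : Int → PySem.Set α) (acc : PySem.Set α) (h : acc.Nodup) :
    (L.foldl (fun acc i => PySem.Set.union acc (g i)) acc).Nodup := by
  induction L generalizing acc with
  | nil => exact h
  | cons a t ih =>
    rw [List.foldl_cons]
    exact ih _ (PySem.Set.nodup_union _ _ h)

theorem pvForallGetD (S : List String) (Pr : String → Prop) :
    (∀ k, k < S.length → Pr (S.getD k "")) ↔ ∀ w ∈ S, Pr w := by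
  constructor
  · intro h w hw
    obtain ⟨k, hk, rfl⟩ := List.mem_iff_getElem.mp hw
    have := h k hk
    rwa [List.getD_eq_getElem S "" hk] at this
  · intro h k hk
    rw [List.getD_eq_getElem S "" hk]
    exact h _ (List.getElem_mem hk)

-- A-side dictionary characterization ---------------------------------------

theorem pvDictA_mem (S : List String) (c : Char) (j : Int) :
    j ∈ ((PySem.List.enumerate S 0).foldl
        (fun d iv => d.modify (pvFirst iv.2) PySem.Set.empty (fun s => PySem.Set.add s iv.1))
        PySem.Dict.empty).getD c PySem.Set.empty
      ↔ ∃ k : Nat, k < S.length ∧ j = (k : Int) ∧ pvFirst (S.getD k "") = c := by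
  have gen : ∀ (l : List (Int × String)) (d : PySem.Dict Char (PySem.Set Int)),
      j ∈ (l.foldl (fun d iv => d.modify (pvFirst iv.2) PySem.Set.empty
            (fun s => PySem.Set.add s iv.1)) d).getD c PySem.Set.empty
        ↔ j ∈ d.getD c PySem.Set.empty ∨ ∃ p ∈ l, pvFirst p.2 = c ∧ j = p.1 := by
    intro l
    induction l with
    | nil => intro d; simp
    | cons iv t ih =>
      intro d
      rw [List.foldl_cons, ih, PySem.Dict.getD_modify]
      by_cases hck : c = pvFirst iv.2
      · subst hck
        rw [if_pos rfl, PySem.Set.mem_add]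
        constructor
        · rintro ((h | rfl) | ⟨p, hp, h1, h2⟩)
          · exact Or.inl h
          · exact Or.inr ⟨iv, List.mem_cons_self, rfl, rfl⟩
          · exact Or.inr ⟨p, List.mem_cons_of_mem _ hp, h1, h2⟩
        · rintro (h | ⟨p, hp, h1, h2⟩)
          · exact Or.inl (Or.inl h)
          · rcases List.mem_cons.mp hp with rfl | hp'
            · exact Or.inl (Or.inr h2)
            · exact Or.inr ⟨p, hp', h1, h2⟩
      · rw [if_neg hck]
        constructor
        · rintro (h | ⟨p, hp, h1, h2⟩)
          · exact Or.inl h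
          · exact Or.inr ⟨p, List.mem_cons_of_mem _ hp, h1, h2⟩
        · rintro (h | ⟨p, hp, h1, h2⟩)
          · exact Or.inl h
          · rcases List.mem_cons.mp hp with rfl | hp'
            · exact absurd h1 (fun e => hck e.symm)
            · exact Or.inr ⟨p, hp', h1, h2⟩
  rw [gen (PySem.List.enumerate S 0) PySem.Dict.empty]
  rw [PySem.Dict.getD_empty]
  constructor
  · rintro (h | ⟨p, hp, h1, h2⟩)
    · cases h
    · obtain ⟨k, hk, rfl⟩ := (PySem.List.mem_enumerate_iff S 0 p).mp hp
      refine ⟨k, hk, by simpa using h2, ?_⟩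
      rw [List.getD_eq_getElem S "" hk]
      simpa using h1
  · rintro ⟨k, hk, rfl, hfk⟩
    refine Or.inr ⟨((k : Int), S[k]), (PySem.List.mem_enumerate_iff S 0 _).mpr ⟨k, hk, by simp⟩, ?_, rfl⟩
    rw [List.getD_eq_getElem S "" hk] at hfk
    exact hfk

theorem pvDictA_nodup (S : List String) (c : Char) :
    (((PySem.List.enumerate S 0).foldl
        (fun d iv => d.modify (pvFirst iv.2) PySem.Set.empty (fun s => PySem.Set.add s iv.1))
        PySem.Dict.empty).getD c PySem.Set.empty).Nodup := by
  have gen : ∀ (l : List (Int × String)) (d : PySem.Dict Char (PySem.Set Int)),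
      (∀ c', (d.getD c' PySem.Set.empty).Nodup) →
      ∀ c', ((l.foldl (fun d iv => d.modify (pvFirst iv.2) PySem.Set.empty
            (fun s => PySem.Set.add s iv.1)) d).getD c' PySem.Set.empty).Nodup := by
    intro l
    induction l with
    | nil => intro d hd c'; exact hd c'
    | cons iv t ih =>
      intro d hd c'
      rw [List.foldl_cons]
      apply ih
      intro c''
      rw [PySem.Dict.getD_modify]
      split
      · exact PySem.Set.nodup_add _ _ (hd _)
      · exact hd c''
  apply gen
  intro c'
  rw [PySem.Dict.getD_empty]
  exact List.nodup_nil

theorem pvDictA_keys (S : List String) :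
    ((PySem.List.enumerate S 0).foldl
        (fun d iv => d.modify (pvFirst iv.2) PySem.Set.empty (fun s => PySem.Set.add s iv.1))
        PySem.Dict.empty).keys = PySem.Set.ofList (S.map pvFirst) := by
  rw [PySem.Dict.keys_foldl_modify_key (PySem.List.enumerate S 0)
    (fun iv => pvFirst iv.2) PySem.Set.empty (fun _ iv s => PySem.Set.add s iv.1) PySem.Dict.empty]
  rw [PySem.Dict.keys_empty, PySem.Set.update_nil_left]
  congr 1
  rw [show (fun iv : Int × String => pvFirst iv.2)
        = (pvFirst ∘ fun iv : Int × String => iv.2) from rfl]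
  rw [← List.map_map, PySem.List.map_snd_enumerate]

theorem pvLenOfList (xs : List Char) :
    (PySem.Set.ofList xs).length = xs.toFinset.card := by
  have h1 : (PySem.Set.ofList xs).toFinset.card = (PySem.Set.ofList xs).length :=
    List.toFinset_card_of_nodup (PySem.Set.nodup_ofList xs)
  have h2 : (PySem.Set.ofList xs).toFinset = xs.toFinset := by
    apply Finset.ext
    intro c
    simp only [List.mem_toFinset]
    exact PySem.Set.mem_ofList xs c
  rw [← h1, h2]

theorem pvDictSize (d : PySem.Dict Char (PySem.Set Int)) : d.size = d.keys.length := by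
  simp [PySem.Dict.size, PySem.Dict.keys]

-- B-side dictionary characterization ---------------------------------------

theorem pvDictB_mem (words : List String) (c x : Char) :
    x ∈ (words.foldl
        (fun d w => d.insert (pvFirst w)
          (PySem.Set.union (d.getD (pvFirst w) PySem.Set.empty) (PySem.Set.ofList [pvLast w])))
        PySem.Dict.empty).getD c PySem.Set.empty
      ↔ ∃ w ∈ words, pvFirst w = c ∧ pvLast w = x := by
  have gen : ∀ (l : List String) (d : PySem.Dict Char (PySem.Set Char)),
      x ∈ (l.foldl (fun d w => d.insert (pvFirst w)
            (PySem.Set.union (d.getD (pvFirst w) PySem.Set.empty)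
              (PySem.Set.ofList [pvLast w]))) d).getD c PySem.Set.empty
        ↔ x ∈ d.getD c PySem.Set.empty ∨ ∃ w ∈ l, pvFirst w = c ∧ pvLast w = x := by
    intro l
    induction l with
    | nil => intro d; simp
    | cons w t ih =>
      intro d
      rw [List.foldl_cons, ih, PySem.Dict.getD_insert]
      by_cases hck : c = pvFirst w
      · subst hck
        rw [if_pos rfl, PySem.Set.mem_union, PySem.Set.mem_ofList]
        simp only [List.mem_singleton]
        constructor
        · rintro ((h | rfl) | ⟨w', hw', h1, h2⟩)
          · exact Or.inl h
          · exact Or.inr ⟨w, List.mem_cons_self, rfl, rfl⟩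
          · exact Or.inr ⟨w', List.mem_cons_of_mem _ hw', h1, h2⟩
        · rintro (h | ⟨w', hw', h1, h2⟩)
          · exact Or.inl (Or.inl h)
          · rcases List.mem_cons.mp hw' with rfl | hw''
            · exact Or.inl (Or.inr h2.symm)
            · exact Or.inr ⟨w', hw'', h1, h2⟩
      · rw [if_neg hck]
        constructor
        · rintro (h | ⟨w', hw', h1, h2⟩)
          · exact Or.inl h
          · exact Or.inr ⟨w', List.mem_cons_of_mem _ hw', h1, h2⟩
        · rintro (h | ⟨w', hw', h1, h2⟩)
          · exact Or.inl h
          · rcases List.mem_cons.mp hw' with rfl | hw''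
            · exact absurd h1 (fun e => hck e.symm)
            · exact Or.inr ⟨w', hw'', h1, h2⟩
  rw [gen words PySem.Dict.empty, PySem.Dict.getD_empty]
  constructor
  · rintro (h | h)
    · cases h
    · exact h
  · exact Or.inr

-- BFS specification ---------------------------------------------------------

theorem pvBfs_spec (firsts : PySem.Set Char) (succ : PySem.Dict Char (PySem.Set Char))
    (T : Finset Char) (st : Char)
    (hTsucc : ∀ c ∈ T, ∀ d ∈ succ.getD c PySem.Set.empty, d ∈ firsts → d ∈ T)
    (pending : List Char) (reach : PySem.Set Char)
    (hreach : ∀ c ∈ reach, c ∈ T)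
    (hpend : ∀ c ∈ pending, c ∈ firsts → c ∈ T)
    (hseed : st ∈ reach ∨ st ∈ pending ∨ st ∉ firsts)
    (hclo : ∀ c ∈ reach, ∀ d ∈ succ.getD c PySem.Set.empty, d ∈ firsts →
      (d ∈ reach ∨ d ∈ pending)) :
    (∀ c ∈ bfsLetters firsts succ pending reach, c ∈ T) ∧
    (st ∈ bfsLetters firsts succ pending reach ∨ st ∉ firsts) ∧
    (∀ c ∈ bfsLetters firsts succ pending reach, ∀ d ∈ succ.getD c PySem.Set.empty,
      d ∈ firsts → d ∈ bfsLetters firsts succ pending reach) := by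
  revert hreach hpend hseed hclo
  fun_induction bfsLetters firsts succ pending reach with
  | case1 reach =>
    intro hreach _ hseed hclo
    refine ⟨hreach, ?_, ?_⟩
    · rcases hseed with h | h | h
      · exact Or.inl h
      · cases h
      · exact Or.inr h
    · intro c hc d hd hdf
      rcases hclo c hc d hd hdf with h | h
      · exact h
      · cases h
  | case2 c pending reach hcond ih =>
    intro hreach hpend hseed hclo
    have hc1 : c ∈ firsts := by
      simp only [Bool.and_eq_true] at hcond
      exact (PySem.Set.contains_iff firsts c).mp hcond.1
    have hc2 : c ∉ reach := by
      simp only [Bool.and_eq_true] at hcond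
      intro hm
      rw [(PySem.Set.contains_iff reach c).mpr hm] at hcond
      exact Bool.noConfusion hcond.2
    have hcT : c ∈ T := hpend c List.mem_cons_self hc1
    apply ih
    · intro x hx
      rcases (PySem.Set.mem_add reach c x).mp hx with h | rfl
      · exact hreach x h
      · exact hcT
    · intro x hx hxf
      rcases List.mem_append.mp hx with h | h
      · exact hpend x (List.mem_cons_of_mem _ h) hxf
      · exact hTsucc c hcT x h hxf
    · rcases hseed with h | h | h
      · exact Or.inl ((PySem.Set.mem_add reach c st).mpr (Or.inl h))
      · rcases List.mem_cons.mp h with heq | h'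
        · exact Or.inl ((PySem.Set.mem_add reach c st).mpr (Or.inr heq))
        · exact Or.inr (Or.inl (List.mem_append.mpr (Or.inl h')))
      · exact Or.inr (Or.inr h)
    · intro x hx d hd hdf
      rcases (PySem.Set.mem_add reach c x).mp hx with h | rfl
      · rcases hclo x h d hd hdf with h' | h'
        · exact Or.inl ((PySem.Set.mem_add reach c d).mpr (Or.inl h'))
        · rcases List.mem_cons.mp h' with heq | h''
          · exact Or.inl ((PySem.Set.mem_add reach c d).mpr (Or.inr heq))
          · exact Or.inr (List.mem_append.mpr (Or.inl h''))
      · exact Or.inr (List.mem_append.mpr (Or.inr hd))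
  | case3 c pending reach hcond ih =>
    intro hreach hpend hseed hclo
    have hcr : c ∉ firsts ∨ c ∈ reach := by
      by_cases h1 : c ∈ firsts
      · right
        by_contra h2
        apply hcond
        simp only [Bool.and_eq_true]
        refine ⟨(PySem.Set.contains_iff firsts c).mpr h1, ?_⟩
        rw [Bool.not_eq_true', Bool.eq_false_iff]
        intro h3
        exact h2 ((PySem.Set.contains_iff reach c).mp h3)
      · exact Or.inl h1
    apply ih
    · exact hreach
    · intro x hx hxf
      exact hpend x (List.mem_cons_of_mem _ hx) hxf
    · rcases hseed with h | h | h
      · exact Or.inl h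
      · rcases List.mem_cons.mp h with heq | h'
        · rcases hcr with h'' | h''
          · exact Or.inr (Or.inr (by rw [heq]; exact h''))
          · exact Or.inl (by rw [heq]; exact h'')
        · exact Or.inr (Or.inl h')
      · exact Or.inr (Or.inr h)
    · intro x hx d hd hdf
      rcases hclo x hx d hd hdf with h | h
      · exact Or.inl h
      · rcases List.mem_cons.mp h with heq | h'
        · rcases hcr with h'' | h''
          · exfalso
            rw [heq] at hdf
            exact h'' hdf
          · exact Or.inl (by rw [heq]; exact h'')
        · exact Or.inr h'

-- the A-side loop step function (proof-side name for the loop body of port A)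
def pvStepA (S : List String) (D' : PySem.Dict Char (PySem.Set Int))
    (stp : PySem.Set Int × PySem.Set Int) : PySem.Set Int × PySem.Set Int :=
  (stp.1.foldl (fun acc i => PySem.Set.union acc
      (D'.getD (pvLast ((PySem.List.pyGet? S i).getD "")) PySem.Set.empty)) PySem.Set.empty,
   PySem.Set.union stp.2 (stp.1.foldl (fun acc i => PySem.Set.union acc
      (D'.getD (pvLast ((PySem.List.pyGet? S i).getD "")) PySem.Set.empty)) PySem.Set.empty))

-- the two port characterizations -------------------------------------------

set_option maxHeartbeats 1600000 in
theorem chained_words_eq_goal (words : List String) :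
    chained_words words = true ↔ pvGoal words
      (pvLast ((PySem.List.pyGet? (PySem.List.sorted words (fun w => w) false) 0).getD "")) := by
  simp only [chained_words]
  set S := PySem.List.sorted words (fun w => w) false with hS
  set st := pvLast ((PySem.List.pyGet? S 0).getD "") with hst
  set D := (PySem.List.enumerate S 0).foldl
      (fun d iv => d.modify (pvFirst iv.2) PySem.Set.empty (fun s => PySem.Set.add s iv.1))
      PySem.Dict.empty with hD
  set D' := if D.contains st then D else D.insert st PySem.Set.empty with hD'
  set psS := pvPairs S with hpsS
  have hstkeys : D.contains st = true ↔ st ∈ S.map pvFirst := by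
    rw [PySem.Dict.contains_iff_mem_keys, hD, pvDictA_keys S]
    exact PySem.Set.mem_ofList _ st
  have hbucket : ∀ (c : Char) (j : Int), j ∈ D'.getD c PySem.Set.empty ↔
      ∃ k : Nat, k < S.length ∧ j = (k : Int) ∧ pvFirst (S.getD k "") = c := by
    intro c j
    rw [hD']
    split
    · rw [hD]; exact pvDictA_mem S c j
    · rename_i hnc
      by_cases hcst : c = st
      · subst hcst
        rw [PySem.Dict.getD_insert_self]
        constructor
        · intro h; cases h
        · rintro ⟨k, hk, rfl, hfk⟩
          exfalso
          apply hnc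
          rw [hstkeys]
          refine List.mem_map.mpr ⟨S.getD k "", ?_, hfk⟩
          rw [List.getD_eq_getElem S "" hk]
          exact List.getElem_mem hk
      · rw [PySem.Dict.getD_insert_of_ne _ _ _ hcst, hD]
        exact pvDictA_mem S c j
  have hbnodup : ∀ c : Char, (D'.getD c PySem.Set.empty).Nodup := by
    intro c
    rw [hD']
    split
    · rw [hD]; exact pvDictA_nodup S c
    · by_cases hcst : c = st
      · subst hcst; rw [PySem.Dict.getD_insert_self]; exact List.nodup_nil
      · rw [PySem.Dict.getD_insert_of_ne _ _ _ hcst, hD]; exact pvDictA_nodup S c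
  set idx0 := D'.getD st PySem.Set.empty with hidx0
  have hloop : (PySem.List.pyRange 0 (D'.size) 1).foldl
      (fun (stp : PySem.Set Int × PySem.Set Int) _ =>
        let new_indexes := stp.1.foldl
          (fun acc i => PySem.Set.union acc
            (D'.getD (pvLast ((PySem.List.pyGet? S i).getD "")) PySem.Set.empty))
          PySem.Set.empty
        (new_indexes, PySem.Set.union stp.2 new_indexes))
      (idx0, idx0) = (pvStepA S D')^[D'.size] (idx0, idx0) := by
    rw [show (fun (stp : PySem.Set Int × PySem.Set Int) (_ : Int) =>
        let new_indexes := stp.1.foldl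
          (fun acc i => PySem.Set.union acc
            (D'.getD (pvLast ((PySem.List.pyGet? S i).getD "")) PySem.Set.empty))
          PySem.Set.empty
        (new_indexes, PySem.Set.union stp.2 new_indexes))
        = (fun stp (_ : Int) => pvStepA S D' stp) from rfl]
    rw [pvFoldlConst (pvStepA S D') _ (idx0, idx0)]
    congr 1
    rw [PySem.List.length_pyRange_one]
    omega
  have hfirstmem : ∀ k : Nat, k < S.length → pvFirst (S.getD k "") ∈ pvFirstsF psS := by
    intro k hk
    rw [hpsS]
    unfold pvFirstsF
    rw [pvPairs_fst]
    apply List.mem_toFinset.mpr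
    refine List.mem_map.mpr ⟨S.getD k "", ?_, rfl⟩
    rw [List.getD_eq_getElem S "" hk]
    exact List.getElem_mem hk
  have hmain : ∀ t : Nat,
      (∀ j : Int, j ∈ ((pvStepA S D')^[t] (idx0, idx0)).1 ↔
        ∃ k : Nat, k < S.length ∧ j = (k : Int) ∧ pvFirst (S.getD k "") ∈ pvQ psS st t) ∧
      (∀ j : Int, j ∈ ((pvStepA S D')^[t] (idx0, idx0)).2 ↔
        ∃ k : Nat, k < S.length ∧ j = (k : Int) ∧ pvFirst (S.getD k "") ∈ pvP psS st t) ∧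
      ((pvStepA S D')^[t] (idx0, idx0)).1.Nodup ∧ ((pvStepA S D')^[t] (idx0, idx0)).2.Nodup := by
    have hbase : ∀ j : Int, j ∈ idx0 ↔
        ∃ k : Nat, k < S.length ∧ j = (k : Int) ∧ pvFirst (S.getD k "") ∈ pvQ psS st 0 := by
      intro j
      rw [hidx0, hbucket st j]
      constructor
      · rintro ⟨k, hk, rfl, hfk⟩
        refine ⟨k, hk, rfl, ?_⟩
        simp only [pvQ, Finset.mem_filter]
        exact ⟨hfirstmem k hk, hfk⟩
      · rintro ⟨k, hk, rfl, hfk⟩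
        simp only [pvQ, Finset.mem_filter] at hfk
        exact ⟨k, hk, rfl, hfk.2⟩
    intro t
    induction t with
    | zero =>
      refine ⟨hbase, ?_, hbnodup st, hbnodup st⟩
      intro j
      rw [show ((pvStepA S D')^[0] (idx0, idx0)).2 = idx0 from rfl]
      rw [hbase j]
      constructor
      · rintro ⟨k, hk, rfl, hfk⟩
        exact ⟨k, hk, rfl, pvQ_subset_pvP psS st 0 hfk⟩
      · rintro ⟨k, hk, rfl, hfk⟩
        refine ⟨k, hk, rfl, ?_⟩
        simp only [pvP, Finset.mem_filter] at hfk
        simp only [pvQ, Finset.mem_filter]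
        exact hfk
    | succ t ih =>
      obtain ⟨ih1, ih2, ihnd1, ihnd2⟩ := ih
      rw [Function.iterate_succ_apply']
      set prev := (pvStepA S D')^[t] (idx0, idx0) with hprev
      have hfst : (pvStepA S D' prev).1 = prev.1.foldl
          (fun acc i => PySem.Set.union acc
            (D'.getD (pvLast ((PySem.List.pyGet? S i).getD "")) PySem.Set.empty))
          PySem.Set.empty := rfl
      have hsnd : (pvStepA S D' prev).2 = PySem.Set.union prev.2 (pvStepA S D' prev).1 := rfl
      have hnew : ∀ j : Int, j ∈ (pvStepA S D' prev).1 ↔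
          ∃ k : Nat, k < S.length ∧ j = (k : Int) ∧ pvFirst (S.getD k "") ∈ pvQ psS st (t + 1) := by
        intro j
        rw [hfst, pvUnionFold_mem]
        constructor
        · rintro (h | ⟨i, hi, hji⟩)
          · cases h
          · obtain ⟨k, hk, rfl, hfk⟩ := (ih1 i).mp hi
            rw [PySem.List.pyGet?_natCast, List.getElem?_eq_getElem hk] at hji
            simp only [Option.getD_some] at hji
            rw [← List.getD_eq_getElem S "" hk] at hji
            obtain ⟨k', hk', rfl, hfk'⟩ := (hbucket _ j).mp hji
            refine ⟨k', hk', rfl, ?_⟩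
            simp only [pvQ, Finset.mem_filter]
            refine ⟨hfirstmem k' hk',
              ⟨(pvFirst (S.getD k ""), pvLast (S.getD k "")), ?_, hfk, hfk'.symm⟩⟩
            rw [hpsS]
            refine List.mem_map.mpr ⟨S.getD k "", ?_, rfl⟩
            rw [List.getD_eq_getElem S "" hk]
            exact List.getElem_mem hk
        · rintro ⟨k', hk', rfl, hfk'⟩
          simp only [pvQ, Finset.mem_filter] at hfk'
          obtain ⟨_, p, hp, hp1, hp2⟩ := hfk'
          rw [hpsS] at hp
          obtain ⟨w, hw, rfl⟩ := List.mem_map.mp hp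
          obtain ⟨k, hk, rfl⟩ := List.mem_iff_getElem.mp hw
          have hgd : S.getD k "" = S[k] := List.getD_eq_getElem S "" hk
          right
          refine ⟨(k : Int), ?_, ?_⟩
          · apply (ih1 (k : Int)).mpr
            exact ⟨k, hk, rfl, by rw [hgd]; exact hp1⟩
          · rw [PySem.List.pyGet?_natCast, List.getElem?_eq_getElem hk]
            simp only [Option.getD_some]
            rw [← hgd]
            apply (hbucket (pvLast (S.getD k "")) ((k' : Nat) : Int)).mpr
            refine ⟨k', hk', rfl, ?_⟩
            rw [hgd]
            exact hp2.symm
      have hnd1 : (pvStepA S D' prev).1.Nodup := by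
        rw [hfst]
        exact pvUnionFold_nodup _ _ _ List.nodup_nil
      refine ⟨hnew, ?_, hnd1, ?_⟩
      · intro j
        rw [hsnd, PySem.Set.mem_union, ih2 j, hnew j]
        rw [pvP_succ_eq psS st t]
        constructor
        · rintro (⟨k, hk, rfl, hfk⟩ | ⟨k, hk, rfl, hfk⟩)
          · exact ⟨k, hk, rfl, Finset.mem_union.mpr (Or.inl hfk)⟩
          · exact ⟨k, hk, rfl, Finset.mem_union.mpr (Or.inr hfk)⟩
        · rintro ⟨k, hk, rfl, hfk⟩
          rcases Finset.mem_union.mp hfk with h | h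
          · exact Or.inl ⟨k, hk, rfl, h⟩
          · exact Or.inr ⟨k, hk, rfl, h⟩
      · rw [hsnd]
        exact PySem.Set.nodup_union _ _ ihnd2
  rw [hloop]
  set K := D'.size with hK
  obtain ⟨_, hseen, _, hseennd⟩ := hmain K
  set seen := ((pvStepA S D')^[K] (idx0, idx0)).2 with hseenEq
  have hlen : S.length = words.length := (PySem.List.sorted_perm words (fun w => w) false).length_eq
  have hfc : pvFirstsF psS = (S.map pvFirst).toFinset := by
    rw [hpsS]; unfold pvFirstsF; rw [pvPairs_fst]
  have hkeys : D.keys.length = (pvFirstsF psS).card := by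
    rw [hD, pvDictA_keys S, hfc]
    exact pvLenOfList (S.map pvFirst)
  have hcard1 : (pvFirstsF psS).card ≤ K := by
    rw [hK, hD']
    split
    · rw [pvDictSize, hkeys]
    · rename_i hnc
      have hfalse : D.contains st = false := Bool.eq_false_iff.mpr hnc
      have hsz : D.keys.length ≤ (D.insert st PySem.Set.empty).size := by
        rw [pvDictSize, PySem.Dict.keys_insert_of_not_contains]
        · rw [List.length_append]
          omega
        · exact hfalse
      omega
  have hcard2 : (pvFirstsF psS).card ≤ words.length := by
    rw [hfc]
    have h1 := List.toFinset_card_le (S.map pvFirst)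
    have h2 : (S.map pvFirst).length = S.length := by simp
    omega
  have hcount : (PySem.Set.len seen = (words.length : Int)) ↔
      ∀ k, k < S.length → pvFirst (S.getD k "") ∈ pvP psS st K := by
    set p := fun k : Nat => decide (pvFirst (S.getD k "") ∈ pvP psS st K) with hp
    set C := ((List.range S.length).filter p).map (fun k : Nat => (k : Int)) with hC
    have hCnd : C.Nodup := by
      rw [hC]
      refine List.Nodup.map ?_ ((List.nodup_range).filter p)
      intro a b hab
      simpa using hab
    have hmemC : ∀ j : Int, j ∈ C ↔ j ∈ seen := by
      intro j
      rw [hC, hseen j]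
      constructor
      · intro hj
        obtain ⟨k, hk, rfl⟩ := List.mem_map.mp hj
        have hk' := List.mem_filter.mp hk
        refine ⟨k, List.mem_range.mp hk'.1, rfl, ?_⟩
        have hdec := hk'.2
        simp only [hp] at hdec
        exact of_decide_eq_true hdec
      · rintro ⟨k, hk, rfl, hfk⟩
        refine List.mem_map.mpr ⟨k, List.mem_filter.mpr ⟨List.mem_range.mpr hk, ?_⟩, rfl⟩
        simp only [hp]
        exact decide_eq_true hfk
    have hperm : C.Perm seen := (List.perm_ext_iff_of_nodup hCnd hseennd).mpr hmemC
    have hlenC : seen.length = ((List.range S.length).filter p).length := by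
      rw [← hperm.length_eq, hC, List.length_map]
    have hsetlen : PySem.Set.len seen = (seen.length : Int) := rfl
    rw [hsetlen, hlenC]
    constructor
    · intro h k hk
      have h'' : ((List.range S.length).filter p).length = words.length := by exact_mod_cast h
      have hflen : ((List.range S.length).filter p).length = (List.range S.length).length := by
        rw [List.length_range]; omega
      have hall := List.length_filter_eq_length_iff.mp hflen
      have hdec := hall k (List.mem_range.mpr hk)
      simp only [hp] at hdec
      exact of_decide_eq_true hdec
    · intro h
      have hall : ∀ k ∈ List.range S.length, p k = true := by
        intro k hk
        simp only [hp, decide_eq_true_eq]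
        exact h k (List.mem_range.mp hk)
      have hflen := List.length_filter_eq_length_iff.mpr hall
      rw [hflen, List.length_range, hlen]
  rw [beq_iff_eq]
  rw [hcount]
  rw [pvForallGetD S (fun w => pvFirst w ∈ pvP psS st K)]
  unfold pvGoal
  have hpermPs : psS.Perm (pvPairs words) := by
    rw [hpsS]
    exact (PySem.List.sorted_perm words (fun w => w) false).map _
  have hfcongr : pvFirstsF (pvPairs words) = pvFirstsF psS := by
    unfold pvFirstsF
    apply Finset.ext
    intro c
    simp only [List.mem_toFinset]
    exact (hpermPs.map Prod.fst).mem_iff.symm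
  have hPeq : pvP psS st K = pvP (pvPairs words) st words.length := by
    rw [pvP_congr psS (pvPairs words) st hpermPs K]
    apply pvP_stable
    · rw [hfcongr]; exact hcard1
    · rw [hfcongr]; exact hcard2
  rw [hPeq]
  constructor
  · intro h w hw
    exact h w ((PySem.List.mem_sorted words (fun w => w) false w).mpr hw)
  · intro h w hw
    exact h w ((PySem.List.mem_sorted words (fun w => w) false w).mp hw)

set_option maxHeartbeats 1600000 in
theorem chained_words_alt_eq_goal (words : List String) :
    chained_words_alt words = true ↔
      pvGoal words (pvLast ((PySem.List.min? words (fun w => w)).getD "")) := by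
  simp only [chained_words_alt]
  set st := pvLast ((PySem.List.min? words (fun w => w)).getD "") with hst
  set F := PySem.Set.ofList (words.map (fun w => pvFirst w)) with hF
  set Dd := words.foldl
    (fun d w => d.insert (pvFirst w)
      (PySem.Set.union (d.getD (pvFirst w) PySem.Set.empty) (PySem.Set.ofList [pvLast w])))
    PySem.Dict.empty with hDd
  set psW := pvPairs words with hpsW
  set T := pvP psW st words.length with hT
  have hFmem : ∀ c : Char, c ∈ F ↔ c ∈ psW.map Prod.fst := by
    intro c
    rw [hF, hpsW, pvPairs_fst]
    exact PySem.Set.mem_ofList _ c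
  have hbucket : ∀ c x : Char, x ∈ Dd.getD c PySem.Set.empty ↔
      ∃ w ∈ words, pvFirst w = c ∧ pvLast w = x := by
    intro c x
    rw [hDd]
    exact pvDictB_mem words c x
  have hcard : (pvFirstsF psW).card ≤ words.length := by
    have h1 := List.toFinset_card_le (psW.map Prod.fst)
    have h2 : (psW.map Prod.fst).length = words.length := by
      rw [hpsW]; simp [pvPairs]
    unfold pvFirstsF
    omega
  have hTstable : pvP psW st (words.length + 1) = T := by
    rw [hT]
    exact pvP_stable psW st (by omega) hcard
  have hTf : ∀ c ∈ T, c ∈ F := by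
    intro c hc
    rw [hFmem]
    have hsub := pvP_subset_firsts psW st words.length
    have hcp : c ∈ pvFirstsF psW := hsub (by rw [hT] at hc; exact hc)
    unfold pvFirstsF at hcp
    exact List.mem_toFinset.mp hcp
  have hTclosed : ∀ c ∈ T, ∀ d ∈ Dd.getD c PySem.Set.empty, d ∈ F → d ∈ T := by
    intro c hc d hd hdf
    obtain ⟨w, hw, hw1, hw2⟩ := (hbucket c d).mp hd
    have hdT : d ∈ pvP psW st (words.length + 1) := by
      simp only [pvP, Finset.mem_union]
      right
      simp only [Finset.mem_filter]
      constructor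
      · unfold pvFirstsF
        apply List.mem_toFinset.mpr
        exact (hFmem d).mp hdf
      · refine ⟨(pvFirst w, pvLast w), ?_, ?_, hw2⟩
        · rw [hpsW]
          exact List.mem_map.mpr ⟨w, hw, rfl⟩
        · rw [hw1]
          rw [hT] at hc
          exact hc
    rw [← hTstable]
    exact hdT
  have hstT : st ∈ F → st ∈ T := by
    intro hcf
    rw [hT]
    have h0 : st ∈ pvP psW st 0 := by
      simp only [pvP, Finset.mem_filter]
      refine ⟨?_, by trivial⟩
      unfold pvFirstsF
      exact List.mem_toFinset.mpr ((hFmem st).mp hcf)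
    exact pvP_mono psW st (Nat.zero_le words.length) h0
  have hspec := pvBfs_spec F Dd T st hTclosed [st] PySem.Set.empty
    (by intro c hc; cases hc)
    (by
      intro x hx hxf
      rcases List.mem_cons.mp hx with heq | h
      · rw [heq]
        exact hstT (by rw [← heq]; exact hxf)
      · cases h)
    (Or.inr (Or.inl List.mem_cons_self))
    (by intro c hc; cases hc)
  set R := bfsLetters F Dd [st] PySem.Set.empty with hR
  have hRT : ∀ c : Char, c ∈ R ↔ c ∈ T := by
    intro c
    constructor
    · exact hspec.1 c
    · intro hcT
      refine pvP_subset_closed psW st R ?_ ?_ words.length c (by rw [hT] at hcT; exact hcT)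
      · intro hstm
        rcases hspec.2.1 with h | h
        · exact h
        · exact absurd ((hFmem st).mpr hstm) h
      · intro p hp hp1 hp2
        apply hspec.2.2 p.1 hp1 p.2
        · apply (hbucket p.1 p.2).mpr
          rw [hpsW] at hp
          obtain ⟨w, hw, hweq⟩ := List.mem_map.mp hp
          exact ⟨w, hw, congrArg Prod.fst hweq, congrArg Prod.snd hweq⟩
        · exact (hFmem p.2).mpr hp2
  rw [List.all_eq_true]
  unfold pvGoal
  constructor
  · intro h w hw
    have hcont := h w hw
    have hmemR := (PySem.Set.contains_iff R (pvFirst w)).mp hcont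
    have := (hRT (pvFirst w)).mp hmemR
    rw [hT] at this
    exact this
  · intro h w hw
    apply (PySem.Set.contains_iff R (pvFirst w)).mpr
    apply (hRT (pvFirst w)).mpr
    rw [hT]
    exact h w hw

theorem pvStart_eq (words : List String) :
    (PySem.List.pyGet? (PySem.List.sorted words (fun w => w) false) 0).getD ""
      = (PySem.List.min? words (fun w => w)).getD "" := by
  cases hsort : PySem.List.sorted words (fun w => w) false with
  | nil =>
    have hw : words = [] := (PySem.List.sorted_eq_nil_iff words (fun w => w) false).mp hsort
    subst hw
    rw [(PySem.List.min?_eq_none_iff [] (fun w => w)).mpr rfl]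
    rfl
  | cons h tl =>
    have hw : words ≠ [] := by
      intro he
      rw [he] at hsort
      have hnil : PySem.List.sorted ([] : List String) (fun w => w) false = [] :=
        (PySem.List.sorted_eq_nil_iff _ _ _).mpr rfl
      rw [hnil] at hsort
      cases hsort
    obtain ⟨m, hm⟩ : ∃ m, PySem.List.min? words (fun w => w) = some m := by
      cases hmm : PySem.List.min? words (fun w => w) with
      | none => exact absurd ((PySem.List.min?_eq_none_iff words (fun w => w)).mp hmm) hw
      | some m => exact ⟨m, rfl⟩
    have h1 := PySem.List.key_head_sorted_le words (fun w => w) hsort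
    have h2 := PySem.List.min?_isMin hm
    have hmem : h ∈ words := by
      rw [← PySem.List.mem_sorted words (fun w => w) false, hsort]
      exact List.mem_cons_self
    have hmm := PySem.List.min?_mem hm
    have heq : h = m := le_antisymm (h1 m hmm) (h2 h hmem)
    rw [hm]
    have hget : PySem.List.pyGet? (h :: tl) 0 = some h := by
      rw [show (0 : Int) = ((0 : Nat) : Int) from rfl, PySem.List.pyGet?_natCast]
      rfl
    rw [hget]
    simpa using heq

-- ===== VERDICT (by name: the statement is the Claim_ definition above) =====
theorem chained_words_spec : Claim_equal_chained_words := by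
  intro words _ _
  unfold Spec_chained_words
  apply pvBoolEq
  rw [chained_words_eq_goal words, chained_words_alt_eq_goal words, pvStart_eq words]
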